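-- pv_equiv track=rewrite | github.com/szaboildi/transcribed-corpus-tools | Scripts/ay_counter.py | count_substr
-- ===== SOURCE A (Python) =====
-- def map_tier(tier, word):
--     """
--     Maps a string to contain only a certain set of character
--     :param tier: characters to map string to (ones that can remain) concatenated
--     :param word: String to transcribe
--     :return: Transcribed string
--     """
--     trans_word = ''
--     for c in word:
--         if c in tier:
--             trans_word += c
--
--     return trans_word
--
-- def count_substr(substr, words, tier='', return_set=False):
--     """
--     Count the number of occurences of a substring in a set of words
--     :param substr: substr to count
--     :param words: set of words to count substr in
--     :param tier: characters to map string to (ones that can remain) concatenated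
--                  allows for non-adjacent matches (intervening segments)
--                  default: empty string
--     :param return_set: whether it should return the set of hits
--                        default: False
--     :return: the number of occurrences of substr in st
--              optionally the set of hits as well
--     """
--     if tier != '':
--         subset = {item for item in words if substr in map_tier(tier, item)}
--     else:
--         subset = {item for item in words if substr in item}
--     counter = 0
--
--     for item in subset:
--         if tier != '':
--             trans_item = map_tier(tier, item)
--             counter += trans_item.count(substr)
--         else:
--             counter += item.count(substr)
--
--     if return_set:
--         return subset, counter
--     return counter
-- ===== SOURCE B (Python) =====
-- def count_substr(substr, words, tier='', return_set=False):
--     subset = set()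
--     counter = 0
--     for word in set(words):
--         trans = ''.join(c for c in word if c in tier) if tier else word
--         if substr in trans:
--             subset.add(word)
--             counter += trans.count(substr)
--     if return_set:
--         return subset, counter
--     return counter
-- ===== Notes on version B (the rewrite author's own statement) =====
-- stated objective: simpler
-- what changed: Replaces A's two-phase design (a set-comprehension filter that transcribes every word, then a second loop over the subset that transcribes each hit again) with a single loop over set(words) that transcribes each distinct word once, growing the subset and the counter together; map_tier becomes an inline join-comprehension.
-- outside the precondition, e.g. on count_substr('a', {'a'}, '', True): A returns ({'a'}, 1), B returns ({'a'}, 1)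
import Mathlib
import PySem

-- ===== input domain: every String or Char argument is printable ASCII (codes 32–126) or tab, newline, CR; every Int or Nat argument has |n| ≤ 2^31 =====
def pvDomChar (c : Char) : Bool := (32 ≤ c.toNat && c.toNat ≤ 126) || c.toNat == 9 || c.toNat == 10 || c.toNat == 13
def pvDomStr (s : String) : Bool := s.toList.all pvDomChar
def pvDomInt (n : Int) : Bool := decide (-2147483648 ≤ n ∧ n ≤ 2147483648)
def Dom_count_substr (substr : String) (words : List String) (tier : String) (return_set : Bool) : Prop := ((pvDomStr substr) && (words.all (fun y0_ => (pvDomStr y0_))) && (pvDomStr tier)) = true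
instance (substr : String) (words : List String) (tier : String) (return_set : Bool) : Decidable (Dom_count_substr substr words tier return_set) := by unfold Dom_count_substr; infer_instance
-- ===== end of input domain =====

-- B merges A's two phases (set-comprehension filter, then a counting loop that re-transcribes
-- every hit) into one loop over the deduplicated words that transcribes each word once;
-- equivalence is about the returned int, so Pre_ restricts to return_set = false.

-- ===== PORT A =====
-- map_tier: builds trans_word by appending each kept character ('c in tier' on a
-- single character is exactly list membership of that character).
def mapTier (tier word : List Char) : List Char :=
  word.foldl (fun acc c => if tier.contains c then acc ++ [c] else acc) []

def count_substr (substr : String) (words : List String) (tier : String) (return_set : Bool) : Int :=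
  let subset : PySem.Set String :=
    if tier ≠ "" then
      PySem.Set.ofList (words.filter
        (fun item => PySem.Chars.isIn substr.toList (mapTier tier.toList item.toList)))
    else
      PySem.Set.ofList (words.filter
        (fun item => PySem.Chars.isIn substr.toList item.toList))
  let counter : Int :=
    subset.foldl (fun acc item =>
      if tier ≠ "" then
        acc + (PySem.Chars.count (mapTier tier.toList item.toList) substr.toList : Int)
      else
        acc + (PySem.Chars.count item.toList substr.toList : Int)) 0
  -- when return_set is true Python returns the pair (subset, counter): not an Int,
  -- excluded by Pre_count_substr; the declared-type result is counter.
  counter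

-- ===== PORT B =====
def count_substr_alt (substr : String) (words : List String) (tier : String) (return_set : Bool) : Int :=
  let st :=
    (PySem.Set.ofList words).foldl
      (fun (st : PySem.Set String × Int) word =>
        let trans : List Char :=
          if tier ≠ "" then word.toList.filter (fun c => tier.toList.contains c)
          else word.toList
        if PySem.Chars.isIn substr.toList trans then
          (PySem.Set.add st.1 word, st.2 + (PySem.Chars.count trans substr.toList : Int))
        else st)
      (PySem.Set.empty, 0)
  -- when return_set is true Python B returns (subset, counter): outside Pre_count_substr.
  st.2

-- ===== PRECONDITION & SPEC =====
-- Pre_ excludes return_set = true, on which both Pythons return a (set, int) pair,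
-- which is not a value of the declared Int result type.
def Pre_count_substr (substr : String) (words : List String) (tier : String) (return_set : Bool) : Prop :=
  return_set = false
instance (substr : String) (words : List String) (tier : String) (return_set : Bool) : Decidable (Pre_count_substr substr words tier return_set) := by unfold Pre_count_substr; infer_instance

def pvWitness_count_substr : String × List String × String × Bool := ("ab", ["cabab", "ab", "cabab"], "", false)

def Spec_count_substr (substr : String) (words : List String) (tier : String) (return_set : Bool) (out : Int) : Prop := out = count_substr_alt substr words tier return_set
instance (substr : String) (words : List String) (tier : String) (return_set : Bool) (out : Int) : Decidable (Spec_count_substr substr words tier return_set out) := by unfold Spec_count_substr; infer_instance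

-- ===== CLAIM (what is proved, stated in full; the proofs are below) =====
def Claim_equal_count_substr : Prop := ∀ (substr : String) (words : List String) (tier : String) (return_set : Bool), Dom_count_substr substr words tier return_set → Pre_count_substr substr words tier return_set → Spec_count_substr substr words tier return_set (count_substr substr words tier return_set)

-- ===== LEMMAS AND PROOFS =====

-- map_tier's append-loop is a filter.
theorem mapTier_eq_filter (tier word : List Char) :
    mapTier tier word = word.filter (fun c => tier.contains c) := by
  unfold mapTier
  simpa using PySem.List.foldl_append_if (fun c => tier.contains c) id word []

-- `Set.add` commutes with filtering by a predicate the added element satisfies.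
theorem filter_set_add {α : Type} [BEq α] [LawfulBEq α] (p : α → Bool) (s : List α) (x : α)
    (hx : p x = true) :
    (PySem.Set.add s x).filter p = PySem.Set.add (s.filter p) x := by
  unfold PySem.Set.add
  by_cases h : x ∈ s
  · simp [h, hx]
  · simp [h, hx, List.filter_append]

-- dedup (first occurrence kept) commutes with filter, fold form.
theorem foldl_add_filter {α : Type} [BEq α] [LawfulBEq α] (p : α → Bool) :
    ∀ (xs s : List α),
      List.foldl PySem.Set.add (s.filter p) (xs.filter p)
        = (List.foldl PySem.Set.add s xs).filter p := by
  intro xs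
  induction xs with
  | nil => intro s; simp
  | cons x t ih =>
    intro s
    by_cases hx : p x = true
    · simpa [hx, filter_set_add p s x hx] using ih (PySem.Set.add s x)
    · have hadd : (PySem.Set.add s x).filter p = s.filter p := by
        unfold PySem.Set.add
        by_cases h : x ∈ s
        · simp [h]
        · simp [h, List.filter_append, hx]
      simp only [List.filter_cons, hx]
      simpa [hx, hadd] using ih (PySem.Set.add s x)

theorem ofList_filter {α : Type} [BEq α] [LawfulBEq α] (p : α → Bool) (xs : List α) :
    PySem.Set.ofList (xs.filter p) = (PySem.Set.ofList xs).filter p := by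
  unfold PySem.Set.ofList
  simpa using foldl_add_filter p xs []

-- summing over the filtered list = guarded summing over the whole list.
theorem foldl_filter_guard {α : Type} (p : α → Bool) (f : α → Int) :
    ∀ (L : List α) (c : Int),
      List.foldl (fun acc w => acc + f w) c (L.filter p)
        = List.foldl (fun acc w => if p w then acc + f w else acc) c L := by
  intro L
  induction L with
  | nil => intro c; rfl
  | cons x t ih =>
    intro c
    by_cases hx : p x = true <;> simp [hx, ih]

-- B's pair-valued loop: the counter component ignores the subset component.
theorem snd_pair_fold {α : Type} [BEq α] (p : α → Bool) (f : α → Int) :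
    ∀ (L : List α) (s : List α) (c : Int),
      (List.foldl
        (fun (st : List α × Int) w =>
          if p w then (PySem.Set.add st.1 w, st.2 + f w) else st) (s, c) L).2
        = List.foldl (fun acc w => if p w then acc + f w else acc) c L := by
  intro L
  induction L with
  | nil => intro s c; rfl
  | cons x t ih =>
    intro s c
    by_cases hx : p x = true <;> simp [hx, ih]

-- the common core: A's two-phase computation equals B's one-pass loop.
theorem core_eq (p : String → Bool) (f : String → Int) (words : List String) :
    List.foldl (fun acc w => acc + f w) 0 (PySem.Set.ofList (words.filter p))
      = (List.foldl
          (fun (st : List String × Int) w =>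
            if p w then (PySem.Set.add st.1 w, st.2 + f w) else st)
          (PySem.Set.empty, 0) (PySem.Set.ofList words)).2 := by
  rw [ofList_filter, foldl_filter_guard, snd_pair_fold]

-- ===== VERDICT (by name: the statement is the Claim_ definition above) =====
theorem count_substr_spec : Claim_equal_count_substr := by
  intro substr words tier return_set _ _
  unfold Spec_count_substr count_substr count_substr_alt
  by_cases htier : tier = ""
  · simp only [htier, ne_eq, not_true_eq_false, if_false]
    exact core_eq (fun item => PySem.Chars.isIn substr.toList item.toList)
      (fun item => (PySem.Chars.count item.toList substr.toList : Int)) words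
  · simp only [ne_eq, htier, not_false_eq_true, if_true, mapTier_eq_filter]
    exact core_eq
      (fun item => PySem.Chars.isIn substr.toList
        (item.toList.filter (fun c => tier.toList.contains c)))
      (fun item => (PySem.Chars.count
        (item.toList.filter (fun c => tier.toList.contains c)) substr.toList : Int)) words
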